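-- pv_equiv track=rewrite | github.com/PyLabRobot/pylabrobot | pylabrobot/plate_reading/molecular_devices_backend.py | _get_cutoff_filter_index_from_wavelength
-- ===== SOURCE A (Python) =====
-- def _get_cutoff_filter_index_from_wavelength(wavelength: int) -> int:
--   """Converts a wavelength to a cutoff filter index."""
--   # This map is a direct translation of the `EmissionCutoff.CutoffFilter` in MaxlineModel.cs
--   # (min_wavelength, max_wavelength, cutoff_filter_index)
--   FILTERS = [
--     (0, 322, 1),
--     (325, 415, 16),
--     (420, 435, 2),
--     (435, 455, 3),
--     (455, 475, 4),
--     (475, 495, 5),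
--     (495, 515, 6),
--     (515, 530, 7),
--     (530, 550, 8),
--     (550, 570, 9),
--     (570, 590, 10),
--     (590, 610, 11),
--     (610, 630, 12),
--     (630, 665, 13),
--     (665, 695, 14),
--     (695, 900, 15),
--   ]
--   for min_wl, max_wl, cutoff_filter_index in FILTERS:
--     if min_wl <= wavelength < max_wl:
--       return cutoff_filter_index
--   raise ValueError(f"No cutoff filter found for wavelength {wavelength}")
-- ===== SOURCE B (Python) =====
-- # Binary search over the sorted lower bounds instead of a linear scan of all rows.
-- _MINS = [0, 325, 420, 435, 455, 475, 495, 515, 530, 550, 570, 590, 610, 630, 665, 695]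
-- # (max_wavelength, cutoff_filter_index) aligned with _MINS
-- _ROWS = [(322, 1), (415, 16), (435, 2), (455, 3), (475, 4), (495, 5), (515, 6), (530, 7),
--          (550, 8), (570, 9), (590, 10), (610, 11), (630, 12), (665, 13), (695, 14), (900, 15)]
--
-- def _get_cutoff_filter_index_from_wavelength(wavelength: int) -> int:
--   """Converts a wavelength to a cutoff filter index."""
--   # bisect_right on the lower bounds, written out by hand
--   lo, hi = 0, len(_MINS)
--   while lo < hi:
--     mid = (lo + hi) // 2
--     if _MINS[mid] <= wavelength:
--       lo = mid + 1
--     else: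
--       hi = mid
--   if lo > 0:
--     max_wl, idx = _ROWS[lo - 1]
--     if wavelength < max_wl:
--       return idx
--   raise ValueError(f"No cutoff filter found for wavelength {wavelength}")
-- ===== Notes on version B (the rewrite author's own statement) =====
-- stated objective: alternative
-- what changed: Replaces the linear scan over the (min,max,index) rows by a hand-written binary search (bisect_right) over the sorted lower bounds, followed by a single range check of the unique candidate row.
import Mathlib
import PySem

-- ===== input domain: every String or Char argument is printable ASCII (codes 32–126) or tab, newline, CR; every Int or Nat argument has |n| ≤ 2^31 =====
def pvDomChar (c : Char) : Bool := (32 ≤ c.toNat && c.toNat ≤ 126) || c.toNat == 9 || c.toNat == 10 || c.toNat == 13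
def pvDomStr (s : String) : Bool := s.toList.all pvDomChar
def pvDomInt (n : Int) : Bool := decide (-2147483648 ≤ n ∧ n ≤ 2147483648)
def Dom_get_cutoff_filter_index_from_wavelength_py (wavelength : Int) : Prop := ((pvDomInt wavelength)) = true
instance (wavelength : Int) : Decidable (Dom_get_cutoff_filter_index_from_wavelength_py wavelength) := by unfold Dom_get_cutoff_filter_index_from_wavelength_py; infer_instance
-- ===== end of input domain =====

-- B replaces A's linear scan of the filter rows by a binary search (bisect_right) over the
-- sorted lower bounds; objective: alternative algorithm, same exact result on Pre_.


-- ===== PORT A =====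
-- A's FILTERS table: (min_wavelength, max_wavelength, cutoff_filter_index)
def pvFiltersA : List (Int × Int × Int) :=
  [(0, 322, 1), (325, 415, 16), (420, 435, 2), (435, 455, 3), (455, 475, 4), (475, 495, 5),
   (495, 515, 6), (515, 530, 7), (530, 550, 8), (550, 570, 9), (570, 590, 10), (590, 610, 11),
   (610, 630, 12), (630, 665, 13), (665, 695, 14), (695, 900, 15)]

-- A's for-loop with early return; the fall-through `raise ValueError` is excluded by Pre_ (sentinel 0)
def pvLoopA (w : Int) : List (Int × Int × Int) → Int
  | [] => 0
  | (mn, mx, idx) :: rest => if mn ≤ w ∧ w < mx then idx else pvLoopA w rest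

def get_cutoff_filter_index_from_wavelength_py (wavelength : Int) : Int :=
  pvLoopA wavelength pvFiltersA

-- ===== PORT B =====
def pvMinsB : List Int := [0, 325, 420, 435, 455, 475, 495, 515, 530, 550, 570, 590, 610, 630, 665, 695]
def pvRowsB : List (Int × Int) :=
  [(322, 1), (415, 16), (435, 2), (455, 3), (475, 4), (495, 5), (515, 6), (530, 7),
   (550, 8), (570, 9), (590, 10), (610, 11), (630, 12), (665, 13), (695, 14), (900, 15)]

-- B's hand-written bisect_right `while lo < hi` loop over pvMinsB; the fuel argument only
-- bounds the iteration count (16 ≥ hi - lo suffices) and makes the same computation total.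
def pvBisect (w : Int) : Nat → Nat → Nat → Nat
  | 0, lo, _ => lo
  | fuel + 1, lo, hi =>
    if lo < hi then
      let mid := (lo + hi) / 2
      if pvMinsB.getD mid 0 ≤ w then pvBisect w fuel (mid + 1) hi else pvBisect w fuel lo mid
    else lo

-- B's `raise ValueError` fall-through is excluded by Pre_ (sentinel 0)
def get_cutoff_filter_index_from_wavelength_py_alt (wavelength : Int) : Int :=
  let lo := pvBisect wavelength pvMinsB.length 0 pvMinsB.length
  if lo > 0 then
    let row := pvRowsB.getD (lo - 1) (0, 0)
    if wavelength < row.1 then row.2 else 0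
  else 0

-- ===== PRECONDITION & SPEC =====
-- Pre_ is exactly the wavelengths covered by some filter row; elsewhere both Pythons raise ValueError.
def Pre_get_cutoff_filter_index_from_wavelength_py (wavelength : Int) : Prop :=
  (0 ≤ wavelength ∧ wavelength < 322) ∨ (325 ≤ wavelength ∧ wavelength < 415) ∨
  (420 ≤ wavelength ∧ wavelength < 900)
instance (wavelength : Int) : Decidable (Pre_get_cutoff_filter_index_from_wavelength_py wavelength) := by unfold Pre_get_cutoff_filter_index_from_wavelength_py; infer_instance
def pvWitness_get_cutoff_filter_index_from_wavelength_py : Int := (500)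
def Spec_get_cutoff_filter_index_from_wavelength_py (wavelength : Int) (out : Int) : Prop := out = get_cutoff_filter_index_from_wavelength_py_alt wavelength
instance (wavelength : Int) (out : Int) : Decidable (Spec_get_cutoff_filter_index_from_wavelength_py wavelength out) := by unfold Spec_get_cutoff_filter_index_from_wavelength_py; infer_instance

-- ===== CLAIM (what is proved, stated in full; the proofs are below) =====
def Claim_equal_get_cutoff_filter_index_from_wavelength_py : Prop := ∀ (wavelength : Int), Dom_get_cutoff_filter_index_from_wavelength_py wavelength → Pre_get_cutoff_filter_index_from_wavelength_py wavelength → Spec_get_cutoff_filter_index_from_wavelength_py wavelength (get_cutoff_filter_index_from_wavelength_py wavelength)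

-- ===== LEMMAS AND PROOFS =====
set_option maxRecDepth 100000 in
theorem pv_key : ∀ n : Nat, n < 900 →
    get_cutoff_filter_index_from_wavelength_py (↑n) = get_cutoff_filter_index_from_wavelength_py_alt (↑n) := by
  decide

theorem pv_eq (w : Int) (h : Pre_get_cutoff_filter_index_from_wavelength_py w) :
    get_cutoff_filter_index_from_wavelength_py w = get_cutoff_filter_index_from_wavelength_py_alt w := by
  unfold Pre_get_cutoff_filter_index_from_wavelength_py at h
  have h0 : 0 ≤ w := by omega
  have := pv_key w.toNat (by omega)
  rwa [Int.toNat_of_nonneg h0] at this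

-- ===== VERDICT (by name: the statement is the Claim_ definition above) =====
theorem get_cutoff_filter_index_from_wavelength_py_spec : Claim_equal_get_cutoff_filter_index_from_wavelength_py := by
  intro w _ hpre
  exact pv_eq w hpre
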